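-- pv_equiv track=rewrite | github.com/vishalgir007/email-ai-company-tool | searcher.py | score_company_names
-- ===== SOURCE A (Python) =====
-- def score_company_names(candidates):
--     """Score company name candidates and return the best one."""
--     if not candidates:
--         return None
--
--     if len(candidates) == 1:
--         return candidates[0]
--
--     scored = []
--     for candidate in candidates:
--         score = 0
--
--         # Prefer shorter, cleaner names
--         if len(candidate) < 30:
--             score += 2
--         if len(candidate) < 15:
--             score += 1
--
--         # Prefer names without common website words
--         website_words = ['website', 'site', 'official', 'home', 'welcome']
--         if not any(word in candidate.lower() for word in website_words):
--             score += 3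
--
--         # Prefer capitalized names
--         if candidate[0].isupper():
--             score += 1
--
--         # Prefer names with proper capitalization
--         if candidate.istitle() or any(c.isupper() for c in candidate[1:]):
--             score += 1
--
--         scored.append((score, candidate))
--
--     # Return highest scored candidate
--     scored.sort(reverse=True, key=lambda x: x[0])
--     return scored[0][1]
-- ===== SOURCE B (Python) =====
-- def score_company_names(candidates):
--     """Score company name candidates and return the best one."""
--     if not candidates:
--         return None
--
--     if len(candidates) == 1:
--         return candidates[0]
--
--     website_words = ('website', 'site', 'official', 'home', 'welcome')
--
--     def score(candidate):
--         return (
--             (2 if len(candidate) < 30 else 0)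
--             + (1 if len(candidate) < 15 else 0)
--             + (3 if all(w not in candidate.lower() for w in website_words) else 0)
--             + (1 if candidate[0].isupper() else 0)
--             + (1 if candidate.istitle() or any(c.isupper() for c in candidate[1:]) else 0)
--         )
--
--     return max(candidates, key=score)
-- ===== Notes on version B (the rewrite author's own statement) =====
-- stated objective: idiomatic
-- what changed: Replaced building a list of (score, candidate) tuples and stable reverse-sorting it with a standalone key function and a single-pass max(candidates, key=score), which picks the first maximal candidate exactly like the stable reverse sort's head; the scoring rules are expressed as a sum of conditional terms instead of an if-accumulator.
import Mathlib
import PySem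

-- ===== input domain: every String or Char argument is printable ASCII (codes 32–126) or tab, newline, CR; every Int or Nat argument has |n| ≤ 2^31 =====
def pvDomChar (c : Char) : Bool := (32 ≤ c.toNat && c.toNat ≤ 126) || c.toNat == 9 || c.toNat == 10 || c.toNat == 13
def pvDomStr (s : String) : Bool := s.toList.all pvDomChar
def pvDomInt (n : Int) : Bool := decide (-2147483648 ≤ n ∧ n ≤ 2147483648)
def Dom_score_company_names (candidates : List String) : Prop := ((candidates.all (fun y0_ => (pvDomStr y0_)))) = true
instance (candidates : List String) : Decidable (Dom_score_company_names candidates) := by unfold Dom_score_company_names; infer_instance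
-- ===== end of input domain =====

-- B replaces A's scored-list construction + stable reverse sort + take-first with a key
-- function and a single-pass max(candidates, key=score) (idiomatic; same scoring rules).

-- ===== PORT A =====

-- hand port of str.istitle() (not in PySem), exact on the ASCII domain: uppercase letters
-- may only follow an uncased character, lowercase only a cased one, and at least one cased
-- character must occur; used by both ports (both Pythons call candidate.istitle()).
def pyIstitleChars : List Char → Bool → Bool → Bool
  | [], _, cased => cased
  | c :: rest, prevCased, cased =>
    if PySem.Chars.isupper c then
      (!prevCased) && pyIstitleChars rest true true
    else if PySem.Chars.islower c then
      prevCased && pyIstitleChars rest true cased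
    else pyIstitleChars rest false cased

def pyIstitle (s : String) : Bool := pyIstitleChars s.toList false false

-- the score accumulated by the body of A's loop for one candidate
-- (candidate[1:] is ported as toList.drop 1, exact for a nonnegative start index;
--  candidate[0].isupper() via PySem.Str.pyGet? — none is exactly where Python raises IndexError)
def pvScoreA (candidate : String) : Int :=
  let score : Int := 0
  let score := if PySem.Str.len candidate < 30 then score + 2 else score
  let score := if PySem.Str.len candidate < 15 then score + 1 else score
  let website_words : List String := ["website", "site", "official", "home", "welcome"]
  let score := if !(website_words.any (fun word => PySem.Str.isIn word (PySem.Str.lower candidate))) then score + 3 else score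
  let score := if ((PySem.Str.pyGet? candidate 0).map PySem.Chars.isupper).getD false then score + 1 else score
  let score := if pyIstitle candidate || (candidate.toList.drop 1).any PySem.Chars.isupper then score + 1 else score
  score

def score_company_names (candidates : List String) : Option String :=
  if candidates.isEmpty then none
  else if candidates.length == 1 then PySem.List.pyGet? candidates 0
  else
    let scored := candidates.foldl (fun acc candidate => acc ++ [(pvScoreA candidate, candidate)]) []
    let scored := PySem.List.sorted scored (fun x => x.1) true
    (PySem.List.pyGet? scored 0).map (fun x => x.2)

-- ===== PORT B =====

-- B's key function 'score': the same rules as a sum of conditional terms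
def pvScoreB (candidate : String) : Int :=
  (if PySem.Str.len candidate < 30 then 2 else 0)
  + (if PySem.Str.len candidate < 15 then 1 else 0)
  + (if (["website", "site", "official", "home", "welcome"] : List String).all
        (fun w => !PySem.Str.isIn w (PySem.Str.lower candidate)) then 3 else 0)
  + (if ((PySem.Str.pyGet? candidate 0).map PySem.Chars.isupper).getD false then 1 else 0)
  + (if pyIstitle candidate || (candidate.toList.drop 1).any PySem.Chars.isupper then 1 else 0)

def score_company_names_alt (candidates : List String) : Option String :=
  match candidates with
  | [] => none
  | [c] => some c
  | _ => PySem.List.max? candidates pvScoreB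

-- ===== PRECONDITION & SPEC =====
-- Pre_ excludes exactly the inputs where Python A raises: a list of two or more candidates
-- containing an empty string (candidate[0] is an IndexError there).
def Pre_score_company_names (candidates : List String) : Prop :=
  candidates.length ≤ 1 ∨ ∀ s ∈ candidates, s ≠ ""
instance (candidates : List String) : Decidable (Pre_score_company_names candidates) := by unfold Pre_score_company_names; infer_instance

def pvWitness_score_company_names : List String := ["Acme", "Acme Inc Official Website"]

def Spec_score_company_names (candidates : List String) (out : Option String) : Prop := out = score_company_names_alt candidates
instance (candidates : List String) (out : Option String) : Decidable (Spec_score_company_names candidates out) := by unfold Spec_score_company_names; infer_instance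

-- ===== CLAIM (what is proved, stated in full; the proofs are below) =====
def Claim_equal_score_company_names : Prop := ∀ (candidates : List String), Dom_score_company_names candidates → Pre_score_company_names candidates → Spec_score_company_names candidates (score_company_names candidates)

-- ===== LEMMAS AND PROOFS =====

-- the two scoring computations agree on every string
lemma pvScore_eq (c : String) : pvScoreA c = pvScoreB c := by
  unfold pvScoreA pvScoreB
  have h : ((["website", "site", "official", "home", "welcome"] : List String).all
      (fun w => !PySem.Str.isIn w (PySem.Str.lower c)))
      = !((["website", "site", "official", "home", "welcome"] : List String).any
      (fun word => PySem.Str.isIn word (PySem.Str.lower c))) := by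
    simp
  simp only [h]
  split_ifs <;> omega

-- head of insertBy with the reverse comparator = one step of the running first-max
lemma head_insertBy {α κ : Type} [LT κ] [DecidableLT κ] (key : α → κ) (x : α) (acc : List α) :
    (PySem.List.insertBy (fun a b => decide (key b < key a)) x acc).head? =
      (match acc.head? with
       | none => some x
       | some m => if key m < key x then some x else some m) := by
  cases acc with
  | nil => simp [PySem.List.insertBy]
  | cons m ys =>
    simp only [PySem.List.insertBy, List.head?_cons]
    by_cases h : key m < key x <;> simp [h]

lemma head_foldl_insertBy {α κ : Type} [LT κ] [DecidableLT κ] (key : α → κ)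
    (l : List α) (acc : List α) :
    (l.foldl (fun acc x => PySem.List.insertBy (fun a b => decide (key b < key a)) x acc) acc).head?
      = l.foldl (fun o x =>
          match o with
          | none => some x
          | some m => if key m < key x then some x else some m) acc.head? := by
  induction l generalizing acc with
  | nil => rfl
  | cons x t ih =>
    simp only [List.foldl_cons]
    rw [ih, head_insertBy]

-- head of the stable reverse sort is Python's max(..., key=…): the FIRST maximal element
lemma head_sorted_rev {α κ : Type} [LT κ] [DecidableLT κ] (key : α → κ) (l : List α) :
    (PySem.List.sorted l key true).head? = PySem.List.max? l key := by
  rw [PySem.List.sorted_rev_eq_foldl_insertBy, head_foldl_insertBy]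
  rfl

-- first-max over (score, candidate) pairs keyed by fst projects to first-max over candidates
lemma max?_map_pair_aux (k : String → Int) (l : List String) (m : Option String) :
    l.foldl (fun o c =>
        match o with
        | none => some ((k c, c))
        | some p => if p.1 < (k c, c).1 then some (k c, c) else some p)
        (m.map (fun c => (k c, c)))
      = (l.foldl (fun o c =>
          match o with
          | none => some c
          | some b => if k b < k c then some c else some b) m).map (fun c => (k c, c)) := by
  induction l generalizing m with
  | nil => rfl
  | cons x t ih =>
    simp only [List.foldl_cons]
    cases m with
    | none => exact ih (some x)
    | some b =>
      simp only [Option.map_some]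
      by_cases h : k b < k x <;> simp only [h, if_true, if_false, ← Option.map_some] <;>
        [exact ih (some x); exact ih (some b)]

lemma max?_map_pair (k : String → Int) (l : List String) :
    (PySem.List.max? (l.map (fun c => (k c, c))) (fun x => x.1)).map (fun x => x.2)
      = PySem.List.max? l k := by
  have e1 : PySem.List.max? (l.map (fun c => (k c, c))) (fun x => x.1)
      = l.foldl (fun o c =>
          match o with
          | none => some ((k c, c))
          | some p => if p.1 < (k c, c).1 then some (k c, c) else some p) none := by
    rw [PySem.List.max?, List.foldl_map]
    apply PySem.List.foldl_congr_mem
    intro acc x _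
    cases acc <;> rfl
  have e2 : PySem.List.max? l k
      = l.foldl (fun o c =>
          match o with
          | none => some c
          | some b => if k b < k c then some c else some b) none := by
    rw [PySem.List.max?]
    apply PySem.List.foldl_congr_mem
    intro acc x _
    cases acc <;> rfl
  rw [e1, e2]
  have h := max?_map_pair_aux k l none
  simp only [Option.map_none] at h
  rw [h]
  cases l.foldl (fun o c =>
      match o with
      | none => some c
      | some b => if k b < k c then some c else some b) none <;> simp

-- ===== VERDICT (by name: the statement is the Claim_ definition above) =====
theorem score_company_names_spec : Claim_equal_score_company_names := by
  intro candidates _ _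
  unfold Spec_score_company_names
  match candidates with
  | [] => rfl
  | [c] =>
    simp [score_company_names, score_company_names_alt, PySem.List.pyGet?, PySem.List.pyIdx?]
  | a :: b :: t =>
    show score_company_names (a :: b :: t) = PySem.List.max? (a :: b :: t) pvScoreB
    unfold score_company_names
    have hlen : ((a :: b :: t).length == 1) = false := by simp
    simp only [List.isEmpty_cons, hlen, Bool.false_eq_true, if_false]
    rw [PySem.List.foldl_append_singleton_eq_map (f := fun c => (pvScoreA c, c))]
    simp only [List.nil_append]
    have hmap : (a :: b :: t).map (fun c => (pvScoreA c, c))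
        = (a :: b :: t).map (fun c => (pvScoreB c, c)) := by
      apply List.map_congr_left
      intro x _
      rw [pvScore_eq]
    rw [hmap]
    have hhead : PySem.List.pyGet?
        (PySem.List.sorted ((a :: b :: t).map (fun c => (pvScoreB c, c))) (fun x => x.1) true) 0
        = (PySem.List.sorted ((a :: b :: t).map (fun c => (pvScoreB c, c))) (fun x => x.1) true).head? := by
      have : PySem.List.sorted ((a :: b :: t).map (fun c => (pvScoreB c, c))) (fun x => x.1) true ≠ [] := by
        rw [Ne, PySem.List.sorted_eq_nil_iff]
        simp
      match hs : PySem.List.sorted ((a :: b :: t).map (fun c => (pvScoreB c, c))) (fun x => x.1) true with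
      | [] => exact absurd hs this
      | y :: ys => simp [PySem.List.pyGet?, PySem.List.pyIdx?]
    rw [hhead, head_sorted_rev, max?_map_pair]
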